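-- pv_equiv track=rewrite | github.com/FrancoisBrucker/cours_informatique | docs/src/cours/algorithmie/projet-suite-additive/code/utilitaire.py | est_une_suite_additive
-- ===== SOURCE A (Python) =====
-- def est_une_suite_additive(u):
--
--     if u[0] != 1:
--         return False
--     for i in range(1, len(u)):
--         ok = False
--         for k in range(i):
--             for l in range(k, i):
--                 if u[i] == u[k] + u[l]:
--                     ok = True
--
--         if not ok:
--             return False
--
--     return True
-- ===== SOURCE B (Python) =====
-- def est_une_suite_additive(u):
--     if u[0] != 1:
--         return False
--     seen = set()
--     for x in u:
--         if seen and not any(x - y in seen for y in seen):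
--             return False
--         seen.add(x)
--     return True
-- ===== Notes on version B (the rewrite author's own statement) =====
-- stated objective: alternative
-- what changed: Replaced A's triple nested index loop (for each i, scan all pairs k<=l<i) by a single pass that maintains the set of values seen so far and tests membership of u[i]-y for each seen value y.
import Mathlib
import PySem

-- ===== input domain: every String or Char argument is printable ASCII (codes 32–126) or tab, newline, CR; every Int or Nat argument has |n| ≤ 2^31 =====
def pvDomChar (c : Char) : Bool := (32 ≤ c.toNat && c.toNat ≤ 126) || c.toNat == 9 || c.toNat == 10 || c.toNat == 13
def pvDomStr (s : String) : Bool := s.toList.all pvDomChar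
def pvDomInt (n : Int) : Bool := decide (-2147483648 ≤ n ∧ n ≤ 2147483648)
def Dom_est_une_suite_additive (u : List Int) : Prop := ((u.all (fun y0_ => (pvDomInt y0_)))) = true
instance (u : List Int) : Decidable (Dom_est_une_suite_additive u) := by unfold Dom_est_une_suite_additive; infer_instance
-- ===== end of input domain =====

-- B replaces A's triple nested index loop by a single pass that keeps the set of
-- values seen so far and tests 'x - y in seen' for each seen y (objective: alternative).

-- ===== PORT A =====
-- indices i, k, l produced by range are always in range, so pyGetD is exact here
def est_une_suite_additive_inner (u : List Int) (i : Int) : Bool :=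
  (PySem.List.pyRange 0 i 1).foldl (fun ok k =>
    (PySem.List.pyRange k i 1).foldl (fun ok l =>
      if PySem.List.pyGetD u i 0 = PySem.List.pyGetD u k 0 + PySem.List.pyGetD u l 0
      then true else ok) ok) false

def est_une_suite_additive (u : List Int) : Bool :=
  -- indexing the first element raises IndexError on the empty list: excluded by Pre_
  if PySem.List.pyGetD u 0 0 ≠ 1 then false
  else
    (PySem.List.pyRange 1 (u.length : Int) 1).foldl
      (fun st i => if st then (if !(est_une_suite_additive_inner u i) then false else st) else st)
      true

-- ===== PORT B =====
def est_une_suite_additive_loop : List Int → PySem.Set Int → Bool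
  | [], _ => true
  | x :: rest, seen =>
    if !seen.isEmpty && !(seen.any (fun y => PySem.Set.contains seen (x - y))) then false
    else est_une_suite_additive_loop rest (PySem.Set.add seen x)

def est_une_suite_additive_alt (u : List Int) : Bool :=
  if PySem.List.pyGetD u 0 0 ≠ 1 then false
  else est_une_suite_additive_loop u PySem.Set.empty

-- ===== PRECONDITION & SPEC =====
-- A indexes the first element, which raises IndexError on the empty list; Pre_ excludes exactly that.
def Pre_est_une_suite_additive (u : List Int) : Prop := u ≠ []
instance (u : List Int) : Decidable (Pre_est_une_suite_additive u) := by
  unfold Pre_est_une_suite_additive; infer_instance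

def pvWitness_est_une_suite_additive : List Int := [1, 2, 3]

def Spec_est_une_suite_additive (u : List Int) (out : Bool) : Prop := out = est_une_suite_additive_alt u
instance (u : List Int) (out : Bool) : Decidable (Spec_est_une_suite_additive u out) := by
  unfold Spec_est_une_suite_additive; infer_instance

-- ===== CLAIM (what is proved, stated in full; the proofs are below) =====
def Claim_equal_est_une_suite_additive : Prop := ∀ (u : List Int), Dom_est_une_suite_additive u → Pre_est_une_suite_additive u → Spec_est_une_suite_additive u (est_une_suite_additive u)

-- ===== LEMMAS AND PROOFS =====

-- common middle form: walk the list keeping the exact prefix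
def pvCheckAll : List Int → List Int → Bool
  | _, [] => true
  | pre, x :: rest =>
    decide (pre = [] ∨ ∃ a ∈ pre, ∃ b ∈ pre, x = a + b) && pvCheckAll (pre ++ [x]) rest

-- fold shapes ----------------------------------------------------------------
theorem pv_foldl_ite_true {α : Type} (p : α → Prop) [DecidablePred p] :
    ∀ (l : List α) (init : Bool),
      l.foldl (fun ok x => if p x then true else ok) init
        = (init || l.any (fun x => decide (p x))) := by
  intro l
  induction l with
  | nil => intro init; simp
  | cons x t ih =>
    intro init
    rw [List.foldl_cons, List.any_cons]
    by_cases h : p x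
    · rw [if_pos h, ih, decide_eq_true h]
      simp
    · rw [if_neg h, ih, decide_eq_false h]
      simp

theorem pv_foldl_or {α : Type} (q : α → Bool) :
    ∀ (l : List α) (init : Bool),
      l.foldl (fun ok x => ok || q x) init = (init || l.any q) := by
  intro l
  induction l with
  | nil => intro init; simp
  | cons x t ih =>
    intro init
    rw [List.foldl_cons, List.any_cons, ih, Bool.or_assoc]

theorem pv_foldl_all_false {α : Type} (f : α → Bool) :
    ∀ (l : List α),
      l.foldl (fun st i => if st then (if !(f i) then false else st) else st) false = false := by
  intro l
  induction l with
  | nil => rfl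
  | cons x t ih =>
    rw [List.foldl_cons, if_neg (by simp)]
    exact ih

theorem pv_foldl_all {α : Type} (f : α → Bool) :
    ∀ (l : List α) (init : Bool),
      l.foldl (fun st i => if st then (if !(f i) then false else st) else st) init
        = (init && l.all f) := by
  intro l
  induction l with
  | nil => intro init; simp
  | cons x t ih =>
    intro init
    rw [List.foldl_cons, List.all_cons]
    cases init
    · rw [if_neg (by simp), pv_foldl_all_false, Bool.false_and]
    · rw [if_pos rfl]
      cases h : f x
      · rw [if_pos (by simp [h]), pv_foldl_all_false]
        simp
      · rw [if_neg (by simp [h]), ih]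
        simp [h]

-- A's inner double loop decides 'u[m] is a sum of two earlier values' ---------
theorem pv_inner_eq (u : List Int) (m : Nat) (hm : m < u.length) :
    est_une_suite_additive_inner u (m : Int)
      = decide (∃ a ∈ u.take m, ∃ b ∈ u.take m, u[m] = a + b) := by
  unfold est_une_suite_additive_inner
  simp only [pv_foldl_ite_true, pv_foldl_or, Bool.false_or]
  rcases h : decide (∃ a ∈ u.take m, ∃ b ∈ u.take m, u[m] = a + b) with _ | _
  · -- the proposition is false: no pair of indices can work
    rw [Bool.eq_false_iff]
    intro htrue
    rw [decide_eq_false_iff_not] at h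
    apply h
    rw [List.any_eq_true] at htrue
    obtain ⟨k, hk, hinner⟩ := htrue
    rw [List.any_eq_true] at hinner
    obtain ⟨l, hl, heqd⟩ := hinner
    rw [PySem.List.mem_pyRange_one] at hk hl
    obtain ⟨hk0, hkm⟩ := hk
    obtain ⟨hlk, hlm⟩ := hl
    rw [decide_eq_true_eq] at heqd
    have h0l : (0:Int) ≤ l := le_trans hk0 hlk
    have hmlen : (m : Int) ≤ (u.length : Int) := by exact_mod_cast hm.le
    rw [PySem.List.pyGetD_natCast,
        PySem.List.pyGetD_eq_getElem u 0 hk0 (by omega),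
        PySem.List.pyGetD_eq_getElem u 0 h0l (by omega),
        List.getD_eq_getElem _ _ hm] at heqd
    have hklt : k.toNat < m := by omega
    have hllt : l.toNat < m := by omega
    refine ⟨u[k.toNat], ?_, u[l.toNat], ?_, heqd⟩
    · have : (u.take m)[k.toNat]'(by simp; omega) = u[k.toNat] := List.getElem_take
      exact this ▸ List.getElem_mem _
    · have : (u.take m)[l.toNat]'(by simp; omega) = u[l.toNat] := List.getElem_take
      exact this ▸ List.getElem_mem _
  · -- the proposition is true: exhibit indices k ≤ l
    rw [decide_eq_true_eq] at h
    obtain ⟨a, ha, b, hb, hab⟩ := h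
    rw [List.mem_iff_getElem] at ha hb
    obtain ⟨ja, hja, haj⟩ := ha
    obtain ⟨jb, hjb, hbj⟩ := hb
    have hjam : ja < m := by simpa using lt_of_lt_of_le hja (by simp)
    have hjbm : jb < m := by simpa using lt_of_lt_of_le hjb (by simp)
    rw [List.getElem_take] at haj hbj
    rw [List.any_eq_true]
    have key : ∀ (p q : Nat) (hpq : p ≤ q) (hqm : q < m),
        u[m] = u[p]'(by omega) + u[q]'(by omega) →
        ∃ k ∈ PySem.List.pyRange 0 (m:Int) 1,
          (PySem.List.pyRange k (m:Int) 1).any (fun l =>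
            decide (PySem.List.pyGetD u (m:Int) 0
              = PySem.List.pyGetD u k 0 + PySem.List.pyGetD u l 0)) = true := by
      intro p q hpq hqm heq
      refine ⟨(p : Int), ?_, ?_⟩
      · rw [PySem.List.mem_pyRange_one]; constructor <;> [positivity; exact_mod_cast by omega]
      · rw [List.any_eq_true]
        refine ⟨(q : Int), ?_, ?_⟩
        · rw [PySem.List.mem_pyRange_one]; constructor <;> exact_mod_cast by omega
        · rw [decide_eq_true_eq]
          rw [PySem.List.pyGetD_natCast, PySem.List.pyGetD_natCast, PySem.List.pyGetD_natCast,
              List.getD_eq_getElem _ _ hm, List.getD_eq_getElem _ _ (by omega),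
              List.getD_eq_getElem _ _ (by omega)]
          exact heq
    rcases le_total ja jb with hle | hle
    · exact key ja jb hle hjbm (by rw [haj, hbj]; exact hab)
    · exact key jb ja hle hjam (by rw [haj, hbj, Int.add_comm]; exact hab)

-- B's loop over the set of seen values is the prefix walk ---------------------
theorem pv_ofList_eq_nil_iff (pre : List Int) : PySem.Set.ofList pre = [] ↔ pre = [] := by
  cases pre with
  | nil => simp [PySem.Set.ofList_nil]
  | cons x t => simp [PySem.Set.ofList_cons]

theorem pv_loop_eq_checkAll :
    ∀ (rest pre : List Int),
      est_une_suite_additive_loop rest (PySem.Set.ofList pre) = pvCheckAll pre rest := by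
  intro rest
  induction rest with
  | nil => intro pre; rfl
  | cons x t ih =>
    intro pre
    rw [est_une_suite_additive_loop, pvCheckAll]
    have hset : PySem.Set.add (PySem.Set.ofList pre) x = PySem.Set.ofList (pre ++ [x]) :=
      (PySem.Set.ofList_append_singleton pre x).symm
    have hgood : ((PySem.Set.ofList pre).any fun y =>
        PySem.Set.contains (PySem.Set.ofList pre) (x - y)) = true
        ↔ (∃ a ∈ pre, ∃ b ∈ pre, x = a + b) := by
      rw [List.any_eq_true]
      constructor
      · rintro ⟨y, hy, hc⟩
        rw [PySem.Set.contains_iff, PySem.Set.mem_ofList] at hc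
        rw [PySem.Set.mem_ofList] at hy
        exact ⟨x - y, hc, y, hy, by ring⟩
      · rintro ⟨a, ha, b, hb, hab⟩
        refine ⟨b, by rwa [PySem.Set.mem_ofList], ?_⟩
        rw [PySem.Set.contains_iff, PySem.Set.mem_ofList]
        have : x - b = a := by omega
        rwa [this]
    have hemp : (PySem.Set.ofList pre).isEmpty = decide (pre = []) := by
      rcases eq_or_ne pre [] with h | h
      · simp [h, PySem.Set.ofList_nil]
      · have : PySem.Set.ofList pre ≠ [] := by
          rw [Ne, pv_ofList_eq_nil_iff]; exact h
        simp [this, h]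
    by_cases hcond : pre = [] ∨ ∃ a ∈ pre, ∃ b ∈ pre, x = a + b
    · have hcnd : (!(PySem.Set.ofList pre).isEmpty &&
          !((PySem.Set.ofList pre).any fun y =>
            PySem.Set.contains (PySem.Set.ofList pre) (x - y))) = false := by
        rcases hcond with h | h
        · rw [hemp]; simp [h]
        · rw [hgood.mpr h]; simp
      rw [hcnd, if_neg (by simp), hset, ih, decide_eq_true hcond, Bool.true_and]
    · have h1 : pre ≠ [] := fun h => hcond (Or.inl h)
      have h2 : ¬ ∃ a ∈ pre, ∃ b ∈ pre, x = a + b := fun h => hcond (Or.inr h)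
      have hg : ((PySem.Set.ofList pre).any fun y =>
          PySem.Set.contains (PySem.Set.ofList pre) (x - y)) = false := by
        rw [Bool.eq_false_iff]
        intro h
        exact h2 (hgood.mp h)
      have hcnd : (!(PySem.Set.ofList pre).isEmpty &&
          !((PySem.Set.ofList pre).any fun y =>
            PySem.Set.contains (PySem.Set.ofList pre) (x - y))) = true := by
        rw [hemp, hg]; simp [h1]
      rw [hcnd, if_pos rfl, decide_eq_false hcond, Bool.false_and]

-- A's indexed sweep is the prefix walk ----------------------------------------
theorem pv_range_all_eq_checkAll (u : List Int) :
    ∀ (n m : Nat), 1 ≤ m → m + n = u.length →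
      ((PySem.List.pyRange (m : Int) (u.length : Int) 1).all
        (fun i => est_une_suite_additive_inner u i))
        = pvCheckAll (u.take m) (u.drop m) := by
  intro n
  induction n with
  | zero =>
    intro m h1 h2
    rw [PySem.List.pyRange_one_eq_nil (by omega), List.drop_eq_nil_of_le (by omega)]
    rfl
  | succ n ih =>
    intro m h1 h2
    have hm : m < u.length := by omega
    rw [PySem.List.pyRange_one_cons (by exact_mod_cast hm), List.all_cons]
    have hdrop : u.drop m = u[m] :: u.drop (m + 1) := List.drop_eq_getElem_cons hm
    rw [hdrop, pvCheckAll]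
    have htake : u.take m ++ [u[m]] = u.take (m + 1) := (List.take_succ_eq_append_getElem hm).symm
    have hne : u.take m ≠ [] := by
      have : (u.take m).length = m := by simp; omega
      intro h; rw [h] at this; simp at this; omega
    rw [htake, pv_inner_eq u m hm]
    have : ((m : Int) + 1) = ((m + 1 : Nat) : Int) := by push_cast; ring
    rw [this, ih (m + 1) (by omega) (by omega)]
    congr 1
    simp [hne]

-- ===== VERDICT (by name: the statement is the Claim_ definition above) =====
theorem est_une_suite_additive_spec : Claim_equal_est_une_suite_additive := by
  intro u _ hpre
  unfold Spec_est_une_suite_additive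
  unfold est_une_suite_additive est_une_suite_additive_alt
  by_cases h0 : PySem.List.pyGetD u 0 0 ≠ 1
  · simp [h0]
  · simp only [h0, if_false]
    have hlen : 1 ≤ u.length := by
      cases u with
      | nil => exact absurd rfl hpre
      | cons x t => simp
    -- B side: loop from the empty set = prefix walk from []
    have hB : est_une_suite_additive_loop u PySem.Set.empty = pvCheckAll [] u := by
      have := pv_loop_eq_checkAll u []
      simpa [PySem.Set.ofList_nil] using this
    -- the prefix walk from [] immediately passes its first step
    have hfirst : pvCheckAll [] u = pvCheckAll (u.take 1) (u.drop 1) := by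
      cases u with
      | nil => exact absurd rfl hpre
      | cons x t => simp [pvCheckAll]
    have hA := pv_range_all_eq_checkAll u (u.length - 1) 1 (by omega) (by omega)
    simp only [Nat.cast_one] at hA
    rw [pv_foldl_all, Bool.true_and, hA, hB, hfirst]
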